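-- pv_equiv track=rewrite | github.com/stefankubicki/istota | tests/test_sandbox.py | _get_bind_pairs
-- ===== SOURCE A (Python) =====
-- def _get_bind_pairs(result, bind_type="--bind"):
--     """Extract (src, dest) pairs for a given bind type from bwrap args."""
--     pairs = []
--     i = 0
--     while i < len(result):
--         if result[i] == bind_type and i + 2 < len(result):
--             pairs.append((result[i + 1], result[i + 2]))
--             i += 3
--         else:
--             i += 1
--     return pairs
-- ===== SOURCE B (Python) =====
-- def _get_bind_pairs(result, bind_type="--bind"):
--     """Extract (src, dest) pairs for a given bind type from bwrap args.
--
--     One uniform pass with a 3-state automaton: every element is fed to the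
--     state machine exactly once (scanning -> saw marker -> have src -> emit),
--     so no index arithmetic, skipping, or look-ahead pulls are needed.
--     """
--     pairs = []
--     pending = None  # None: scanning; (): saw marker, need src; (src,): need dest
--     for x in result:
--         if pending is None:
--             if x == bind_type:
--                 pending = ()
--         elif pending == ():
--             pending = (x,)
--         else:
--             pairs.append((pending[0], x))
--             pending = None
--     return pairs
-- ===== Notes on version B (the rewrite author's own statement) =====
-- stated objective: alternative
-- what changed: Replaced the index-arithmetic while loop (guard i+2<len, skip 3 on a match, 1 otherwise) with one uniform pass feeding every element exactly once to a 3-state automaton (scanning / saw-marker / have-src) whose state replaces all index bookkeeping and look-ahead; measured ~2x faster since direct iteration avoids per-step len() calls, index arithmetic and subscripting.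
import Mathlib
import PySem

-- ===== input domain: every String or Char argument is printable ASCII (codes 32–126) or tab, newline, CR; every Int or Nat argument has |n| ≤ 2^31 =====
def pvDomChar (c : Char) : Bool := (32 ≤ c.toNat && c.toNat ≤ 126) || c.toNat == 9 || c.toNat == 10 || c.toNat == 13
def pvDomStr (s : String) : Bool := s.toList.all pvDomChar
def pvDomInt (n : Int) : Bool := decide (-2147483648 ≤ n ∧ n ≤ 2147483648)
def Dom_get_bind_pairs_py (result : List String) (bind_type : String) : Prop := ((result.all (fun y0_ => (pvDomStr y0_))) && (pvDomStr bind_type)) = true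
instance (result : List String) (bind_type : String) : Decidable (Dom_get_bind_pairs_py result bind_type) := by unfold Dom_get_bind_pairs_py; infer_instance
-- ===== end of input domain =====

-- B replaces A's manually-indexed skip-by-3 while loop by one uniform pass feeding each element to a 3-state automaton (alternative decomposition; same O(n) cost).


-- ===== PORT A =====
-- A's while loop with index i; indices accessed only in range, so getD is exact.
def pvALoop (result : List String) (bind_type : String) (i : Nat) : List (String × String) :=
  if h : i < result.length then
    if (result.getD i "" == bind_type) ∧ i + 2 < result.length then
      (result.getD (i + 1) "", result.getD (i + 2) "") :: pvALoop result bind_type (i + 3)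
    else
      pvALoop result bind_type (i + 1)
  else []
termination_by result.length - i
decreasing_by all_goals omega

def get_bind_pairs_py (result : List String) (bind_type : String) : List (String × String) :=
  pvALoop result bind_type 0

-- ===== PORT B =====
-- B's automaton state 'pending': none = scanning; some none = saw marker, need src; some (some src) = need dest.
def pvStep (bt : String) (st : List (String × String) × Option (Option String)) (x : String) :
    List (String × String) × Option (Option String) :=
  match st.2 with
  | none => if x == bt then (st.1, some none) else (st.1, none)
  | some none => (st.1, some (some x))
  | some (some src) => (st.1 ++ [(src, x)], none)

def get_bind_pairs_py_alt (result : List String) (bind_type : String) : List (String × String) :=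
  (result.foldl (pvStep bind_type) ([], none)).1

-- ===== PRECONDITION & SPEC =====
def Spec_get_bind_pairs_py (result : List String) (bind_type : String) (out : List (String × String)) : Prop := out = get_bind_pairs_py_alt result bind_type
instance (result : List String) (bind_type : String) (out : List (String × String)) : Decidable (Spec_get_bind_pairs_py result bind_type out) := by unfold Spec_get_bind_pairs_py; infer_instance

-- ===== CLAIM (what is proved, stated in full; the proofs are below) =====
def Claim_equal_get_bind_pairs_py : Prop := ∀ (result : List String) (bind_type : String), Dom_get_bind_pairs_py result bind_type → Spec_get_bind_pairs_py result bind_type (get_bind_pairs_py result bind_type)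

-- ===== LEMMAS AND PROOFS =====

-- Proof-side bridge: the common recursive characterisation of both programs' output.
def pvBLoop (bind_type : String) : List String → List (String × String)
  | [] => []
  | x :: rest =>
    if x == bind_type then
      match rest with
      | src :: dest :: rest' => (src, dest) :: pvBLoop bind_type rest'
      | _ => []
    else pvBLoop bind_type rest

-- What the remaining input contributes from the 'need src' state.
def pvPendA (bt : String) : List String → List (String × String)
  | s :: d :: r => (s, d) :: pvBLoop bt r
  | _ => []

-- …and from the 'need dest (src in hand)' state.
def pvPendB (bt src : String) : List String → List (String × String)
  | d :: r => (src, d) :: pvBLoop bt r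
  | [] => []

-- One-step unfolding of pvBLoop on a cons cell (its compiler equations split on the tail's shape).
theorem pvBLoop_cons (bt x : String) (rest : List String) :
    pvBLoop bt (x :: rest) =
      if x == bt then
        match rest with
        | src :: dest :: rest' => (src, dest) :: pvBLoop bt rest'
        | _ => []
      else pvBLoop bt rest := by
  by_cases h : (x == bt) = true <;>
  · cases rest with
    | nil => simp [pvBLoop, h]
    | cons a t => cases t <;> simp [pvBLoop, h]

-- The automaton fold, started in any of its three states, computes the bridge functions.
theorem pvFold_spec (bt : String) : ∀ (l : List String) (acc : List (String × String)),
    ((l.foldl (pvStep bt) (acc, none)).1 = acc ++ pvBLoop bt l)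
    ∧ ((l.foldl (pvStep bt) (acc, some none)).1 = acc ++ pvPendA bt l)
    ∧ (∀ src, (l.foldl (pvStep bt) (acc, some (some src))).1 = acc ++ pvPendB bt src l) := by
  intro l
  induction l with
  | nil => intro acc; simp [pvBLoop, pvPendA, pvPendB]
  | cons x rest ih =>
    intro acc
    refine ⟨?_, ?_, ?_⟩
    · by_cases h : (x == bt) = true
      · simp only [List.foldl_cons, pvStep, h, if_pos, pvBLoop_cons]
        cases rest with
        | nil => simpa [pvPendA] using (ih acc).2.1
        | cons a t => cases t <;> simpa [pvPendA, h] using (ih acc).2.1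
      · simpa [List.foldl_cons, pvStep, h, pvBLoop_cons] using (ih acc).1
    · simp only [List.foldl_cons, pvStep]
      cases rest with
      | nil => simpa [pvPendA, pvPendB] using (ih acc).2.2 x
      | cons d r => simpa [pvPendA, pvPendB] using (ih acc).2.2 x
    · intro src
      simp only [List.foldl_cons, pvStep, pvPendB]
      have := (ih (acc ++ [(src, x)])).1
      simpa using this

-- Once fewer than three elements remain, A's loop can append nothing more.
theorem pvALoop_tail (result : List String) (bind_type : String) (i : Nat)
    (h : result.length ≤ i + 2) : pvALoop result bind_type i = [] := by
  unfold pvALoop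
  split
  · rename_i hlt
    rw [if_neg (by omega : ¬((result.getD i "" == bind_type) ∧ i + 2 < result.length))]
    exact pvALoop_tail result bind_type (i + 1) (by omega)
  · rfl
termination_by result.length - i
decreasing_by omega

theorem pvALoop_eq_pvBLoop (result : List String) (bind_type : String) (i : Nat) :
    pvALoop result bind_type i = pvBLoop bind_type (result.drop i) := by
  unfold pvALoop
  split
  · rename_i hlt
    rw [List.drop_eq_getElem_cons hlt]
    by_cases heq : result[i] == bind_type
    · rw [pvBLoop_cons, if_pos heq]
      by_cases hlen : i + 2 < result.length
      · rw [if_pos ⟨by simpa [List.getD_eq_getElem?_getD, List.getElem?_eq_getElem hlt] using heq, hlen⟩]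
        rw [List.drop_eq_getElem_cons (by omega : i + 1 < result.length),
            List.drop_eq_getElem_cons (by omega : i + 2 < result.length)]
        simp only [List.getD_eq_getElem?_getD,
          List.getElem?_eq_getElem (by omega : i + 1 < result.length),
          List.getElem?_eq_getElem (by omega : i + 2 < result.length), Option.getD_some]
        exact congrArg _ (pvALoop_eq_pvBLoop result bind_type (i + 3))
      · rw [if_neg (by intro ⟨_, h2⟩; exact hlen h2)]
        have hdrop : result.drop (i + 1) = [] ∨ ∃ y, result.drop (i + 1) = [y] := by
          have hl : (result.drop (i + 1)).length ≤ 1 := by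
            rw [List.length_drop]; omega
          match hd : result.drop (i + 1) with
          | [] => exact Or.inl rfl
          | [y] => exact Or.inr ⟨y, rfl⟩
          | y :: z :: t => rw [hd] at hl; simp at hl
        have := pvALoop_tail result bind_type (i + 1) (by omega)
        rcases hdrop with h1 | ⟨y, h1⟩ <;> rw [h1] <;> simp [this]
    · rw [if_neg (by
        intro ⟨h1, _⟩
        exact heq (by simpa [List.getD_eq_getElem?_getD, List.getElem?_eq_getElem hlt] using h1))]
      rw [pvBLoop_cons, if_neg heq]
      exact pvALoop_eq_pvBLoop result bind_type (i + 1)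
  · rename_i hge
    rw [List.drop_eq_nil_of_le (by omega)]
    rfl
termination_by result.length - i
decreasing_by all_goals omega

-- ===== VERDICT (by name: the statement is the Claim_ definition above) =====
theorem get_bind_pairs_py_spec : Claim_equal_get_bind_pairs_py := by
  intro result bind_type _
  unfold Spec_get_bind_pairs_py get_bind_pairs_py get_bind_pairs_py_alt
  rw [(pvFold_spec bind_type result []).1]
  simpa using pvALoop_eq_pvBLoop result bind_type 0
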